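-- pv_equiv track=rewrite | github.com/max-dingsda/MDAL | mdal/trainer/trainer.py | _build_response_sample
-- ===== SOURCE A (Python) =====
-- def _build_response_sample(responses: list[str], max_chars: int) -> str:
--     """
--     Builds a text block from assistant responses.
--     Limited to max_chars to avoid overloading the LLM context window.
--     """
--     parts: list[str] = []
--     total = 0
--     for i, r in enumerate(responses):
--         entry = f"[{i+1}] {r}"
--         if total + len(entry) > max_chars:
--             break
--         parts.append(entry)
--         total += len(entry)
--     return "\n\n".join(parts)
-- ===== SOURCE B (Python) =====
-- def _build_response_sample(responses: list[str], max_chars: int) -> str: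
--     """
--     Builds a text block from assistant responses.
--     Limited to max_chars to avoid overloading the LLM context window.
--     """
--     entries = ["[%d] %s" % (i + 1, r) for i, r in enumerate(responses)]
--     cums = []
--     c = 0
--     for e in entries:
--         c += len(e)
--         cums.append(c)
--     k = 0
--     while k < len(cums) and cums[k] <= max_chars:
--         k += 1
--     return "\n\n".join(entries[:k])
-- ===== Notes on version B (the rewrite author's own statement) =====
-- stated objective: alternative
-- what changed: A interleaves formatting, budget accounting and early break in one loop; B first materialises the full formatted entry list, then a prefix-sum table of their lengths, finds the cut index with a scan stopping at the first overflow, and joins the sliced prefix.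
import Mathlib
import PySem

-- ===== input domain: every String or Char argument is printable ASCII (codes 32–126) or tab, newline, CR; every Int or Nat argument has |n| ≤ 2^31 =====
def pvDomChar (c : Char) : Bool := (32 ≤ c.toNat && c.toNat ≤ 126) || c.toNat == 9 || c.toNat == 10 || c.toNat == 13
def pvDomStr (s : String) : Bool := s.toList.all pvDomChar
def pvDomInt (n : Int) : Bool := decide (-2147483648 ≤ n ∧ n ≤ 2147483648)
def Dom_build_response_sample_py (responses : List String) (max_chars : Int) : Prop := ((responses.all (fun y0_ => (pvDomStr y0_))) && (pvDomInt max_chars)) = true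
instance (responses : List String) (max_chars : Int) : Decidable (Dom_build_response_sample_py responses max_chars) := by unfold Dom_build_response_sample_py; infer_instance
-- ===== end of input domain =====

-- B replaces A's single accumulate-and-break loop by: full entry list, prefix-sum table, a cut-index scan, slice, join (alternative decomposition, same cost).

-- ===== PORT A =====
-- the 'for i, r in enumerate(responses)' loop: parts and total are the loop state; the break returns parts as built so far
def brsA_loop (max_chars : Int) : List (Int × String) → List String → Int → List String
  | [], parts, _ => parts
  | (i, r) :: rest, parts, total =>
    let entry := "[" ++ PySem.Int.toStr (i + 1) ++ "] " ++ r
    if total + PySem.Str.len entry > max_chars then parts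
    else brsA_loop max_chars rest (parts ++ [entry]) (total + PySem.Str.len entry)

def build_response_sample_py (responses : List String) (max_chars : Int) : String :=
  PySem.Str.join "\n\n" (brsA_loop max_chars (PySem.List.enumerate responses 0) [] 0)

-- ===== PORT B =====
-- the 'for e in entries' prefix-sum loop of Source B (c is the running value appended to cums)
def brsB_cums : List String → Int → List Int
  | [], _ => []
  | e :: es, c => (c + PySem.Str.len e) :: brsB_cums es (c + PySem.Str.len e)

-- the 'while k < len(cums) and cums[k] <= max_chars: k += 1' scan of Source B
def brsB_cut (max_chars : Int) : List Int → Nat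
  | [] => 0
  | c :: cs => if c ≤ max_chars then brsB_cut max_chars cs + 1 else 0

def build_response_sample_py_alt (responses : List String) (max_chars : Int) : String :=
  let entries := (PySem.List.enumerate responses 0).map
    (fun p => "[" ++ PySem.Int.toStr (p.1 + 1) ++ "] " ++ p.2)
  let cums := brsB_cums entries 0
  let k := brsB_cut max_chars cums
  PySem.Str.join "\n\n" (PySem.List.slice entries none (some (k : Int)))

-- ===== PRECONDITION & SPEC =====
def Spec_build_response_sample_py (responses : List String) (max_chars : Int) (out : String) : Prop := out = build_response_sample_py_alt responses max_chars
instance (responses : List String) (max_chars : Int) (out : String) : Decidable (Spec_build_response_sample_py responses max_chars out) := by unfold Spec_build_response_sample_py; infer_instance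

-- ===== CLAIM (what is proved, stated in full; the proofs are below) =====
def Claim_equal_build_response_sample_py : Prop := ∀ (responses : List String) (max_chars : Int), Dom_build_response_sample_py responses max_chars → Spec_build_response_sample_py responses max_chars (build_response_sample_py responses max_chars)

-- ===== LEMMAS AND PROOFS =====

theorem brsA_loop_eq_take (max_chars : Int) (ps : List (Int × String)) :
    ∀ (parts : List String) (total : Int),
    brsA_loop max_chars ps parts total
      = parts ++ (ps.map (fun p => "[" ++ PySem.Int.toStr (p.1 + 1) ++ "] " ++ p.2)).take
          (brsB_cut max_chars
            (brsB_cums (ps.map (fun p => "[" ++ PySem.Int.toStr (p.1 + 1) ++ "] " ++ p.2)) total)) := by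
  induction ps with
  | nil => intro parts total; simp [brsA_loop, brsB_cums, brsB_cut]
  | cons p rest ih =>
    intro parts total
    obtain ⟨i, r⟩ := p
    simp only [brsA_loop, List.map_cons, brsB_cums, brsB_cut]
    split_ifs with h h2
    · omega
    · simp
    · rw [ih]; simp
    · omega

theorem build_response_sample_py_spec : Claim_equal_build_response_sample_py := by
  intro responses max_chars _
  show PySem.Str.join "\n\n" (brsA_loop max_chars (PySem.List.enumerate responses 0) [] 0) = _
  rw [brsA_loop_eq_take]
  simp [build_response_sample_py_alt, PySem.List.slice_to_natCast]
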